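-- pv_equiv track=rewrite | github.com/isk02206/python | informatics/Tutor 2017-2018 (2)/Corkscrew.py | parasitic
-- ===== SOURCE A (Python) =====
-- def rotateRight(number):
--
--     number = str(number)
--
--     for position in range(len(number)-1, 0, -1):
--
--         if number[position] != '0':
--             result = number[position] + number[:position]
--             break
--
--     return int(result)
--
-- def parasitic(number):
--
--     result = 0
--     rotated = rotateRight(number)
--
--     for times in range(1,10):
--
--         if rotated == number * times:
--             result = times
--             break
--
--     return result
-- ===== SOURCE B (Python) =====
-- def parasitic(number):
--     s = str(number)
--     t = s.rstrip('0')
--     rotated = int(t[-1] + s[:len(t) - 1])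
--     q, r = divmod(rotated, number)
--     return q if r == 0 and 1 <= q <= 9 else 0
-- ===== Notes on version B (the rewrite author's own statement) =====
-- stated objective: simpler
-- what changed: B finds the rotation in one rstrip('0') instead of A's backward index-scanning loop, and replaces A's linear search for a multiplier in range(1,10) by a single divmod closed-form check.
-- outside the precondition, e.g. on parasitic(1): A raises UnboundLocalError, B returns 1; on parasitic(5): A raises UnboundLocalError, B returns 1; on parasitic(10): A raises UnboundLocalError, B returns 0
-- crash fix: A raises UnboundLocalError on every positive number whose digits after the first are all '0' (1..9 and d*10^k), where the rotation loop never breaks; B returns the divmod answer for the rotation fixed point there: 1 for single-digit numbers, 0 for d*10^k with k >= 1. — e.g. on parasitic(5): A raises UnboundLocalError, B returns 1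
import Mathlib
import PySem

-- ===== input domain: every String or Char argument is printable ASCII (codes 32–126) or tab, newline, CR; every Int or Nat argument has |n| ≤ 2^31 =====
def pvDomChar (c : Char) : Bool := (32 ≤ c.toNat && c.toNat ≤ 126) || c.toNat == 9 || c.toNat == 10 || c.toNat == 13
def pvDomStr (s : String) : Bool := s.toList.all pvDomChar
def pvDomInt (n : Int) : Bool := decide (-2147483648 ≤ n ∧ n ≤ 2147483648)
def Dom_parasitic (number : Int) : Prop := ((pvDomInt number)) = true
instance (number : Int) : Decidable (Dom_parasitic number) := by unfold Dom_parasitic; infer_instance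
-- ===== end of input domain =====

-- B replaces A's backward index search by rstrip('0') and A's 1..9 multiplier search by one divmod check (simpler).

-- ===== PORT A =====
-- rotateRight is inlined as the Option-valued first stage: none models the Python
-- exceptions there (UnboundLocalError when the loop never breaks, ValueError from int()).
-- number[position] is modelled with getD '0': position always lies in range when reached.
def parasitic (number : Int) : Int :=
  let s := (PySem.Int.toStr number).toList
  let result? :=
    match (PySem.List.pyRange ((s.length : Int) - 1) 0 (-1)).find?
        (fun position => ((PySem.List.pyGet? s position).getD '0') != '0') with
    | none => none
    | some position =>
        match PySem.List.pyGet? s position with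
        | none => none
        | some ch => some (ch :: PySem.List.slice s none (some position))
  match result? with
  | none => 0
  | some result =>
    match PySem.Int.ofChars? result with
    | none => 0
    | some rotated =>
      ((PySem.List.pyRange 1 10 1).find? (fun times => rotated == number * times)).getD 0

-- ===== PORT B =====
def parasitic_alt (number : Int) : Int :=
  let s := (PySem.Int.toStr number).toList
  let t := (s.reverse.dropWhile (fun ch => ch == '0')).reverse
  match PySem.List.pyGet? t (-1) with
  | none => 0
  | some last =>
    match PySem.Int.ofChars? (last :: PySem.List.slice s none (some ((t.length : Int) - 1))) with
    | none => 0
    | some rotated =>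
      match PySem.Int.divmod? rotated number with
      | none => 0
      | some (q, r) => if r = 0 ∧ 1 ≤ q ∧ q ≤ 9 then q else 0

-- ===== PRECONDITION & SPEC =====
-- Pre_ holds exactly where Python A returns: it excludes negatives and 0..9 and the
-- numbers d*10^k (digits after the first all '0'), on all of which A raises
-- (UnboundLocalError or ValueError); it excludes nothing on which A returns.
def Pre_parasitic (number : Int) : Prop :=
  10 ≤ number ∧ (((PySem.Int.toStr number).toList.drop 1).any (fun ch => ch != '0')) = true
instance (number : Int) : Decidable (Pre_parasitic number) := by unfold Pre_parasitic; infer_instance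
def pvWitness_parasitic : Int := 12

-- A raises (UnboundLocalError: the rotation loop never breaks) on every positive number
-- whose digits after the first are all '0'; B returns the divmod answer for the
-- rotation fixed point there: 1 on single-digit numbers, 0 on d*10^k with k ≥ 1.
def Raises_parasitic (number : Int) : Prop :=
  1 ≤ number ∧ (((PySem.Int.toStr number).toList.drop 1).all (fun ch => ch == '0')) = true
instance (number : Int) : Decidable (Raises_parasitic number) := by unfold Raises_parasitic; infer_instance
def pvRaiseWitness_parasitic : Int := 5
def pvRaiseWitnessOut_parasitic : Int := 1

def Spec_parasitic (number : Int) (out : Int) : Prop := out = parasitic_alt number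
instance (number : Int) (out : Int) : Decidable (Spec_parasitic number out) := by unfold Spec_parasitic; infer_instance

-- ===== CLAIM (what is proved, stated in full; the proofs are below) =====
def Claim_equal_parasitic : Prop := ∀ (number : Int), Dom_parasitic number → Pre_parasitic number → Spec_parasitic number (parasitic number)
def Claim_raises_parasitic : Prop := (∀ (number : Int), Dom_parasitic number → Raises_parasitic number → ¬ Pre_parasitic number) ∧ (Dom_parasitic (pvRaiseWitness_parasitic) ∧ Raises_parasitic (pvRaiseWitness_parasitic) ∧ parasitic_alt (pvRaiseWitness_parasitic) = pvRaiseWitnessOut_parasitic)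

-- ===== LEMMAS AND PROOFS =====

theorem pv_takeWhile_zero (l : List Char) :
    l.takeWhile (fun ch => ch == '0') = List.replicate (l.takeWhile (fun ch => ch == '0')).length '0' := by
  rw [List.eq_replicate_iff]
  exact ⟨rfl, fun b hb => by simpa using List.mem_takeWhile_imp hb⟩
theorem pv_find_desc (pr : Int → Bool) (j : ℕ) (hj : 1 ≤ j)
    (hT : pr (j : Int) = true) (hF : ∀ i : ℕ, j < i → pr (i : Int) = false) :
    ∀ n : ℕ, (PySem.List.pyRange ((j + n : ℕ) : Int) 0 (-1)).find? pr = some (j : Int) := by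
  intro n
  induction n with
  | zero =>
    rw [PySem.List.pyRange_neg_one_cons (by push_cast; omega)]
    simp only [List.find?_cons, add_zero]
    rw [hT]
  | succ n ih =>
    rw [PySem.List.pyRange_neg_one_cons (by push_cast; omega)]
    simp only [List.find?_cons]
    rw [hF (j + (n+1)) (by omega)]
    rw [show ((j + (n+1) : ℕ) : Int) - 1 = ((j + n : ℕ) : Int) by push_cast; omega]
    exact ih
theorem pv_partII (r number : Int) (h10 : 10 ≤ number) :
    (((PySem.List.pyRange 1 10 1).find? (fun times => r == number * times)).getD 0)
      = match PySem.Int.divmod? r number with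
        | none => 0
        | some (q, rr) => if rr = 0 ∧ 1 ≤ q ∧ q ≤ 9 then q else 0 := by
  have hne : number ≠ 0 := by omega
  have hpos : (0:Int) ≤ number := by omega
  have hfd : r.fdiv number = r / number := by
    rw [Int.fdiv_eq_ediv, if_pos (Or.inl hpos)]; ring
  have hfm : r.fmod number = r % number := by
    rw [Int.fmod_eq_emod, if_pos (Or.inl hpos)]; ring
  have hrange : PySem.List.pyRange 1 10 1 = [1,2,3,4,5,6,7,8,9] := by decide
  simp only [PySem.Int.divmod?, if_neg hne, hrange, hfd, hfm]
  by_cases hc : r % number = 0 ∧ 1 ≤ r / number ∧ r / number ≤ 9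
  · obtain ⟨hm, hq1, hq9⟩ := hc
    have hr : r = number * (r / number) := by
      have := Int.mul_ediv_add_emod r number
      omega
    rw [if_pos ⟨hm, hq1, hq9⟩]
    set q := r / number with hqdef
    clear_value q
    rw [hr]
    have key : (fun times => number * q == number * times) = (fun times => q == times) := by
      funext t
      rw [Bool.eq_iff_iff]
      simp [mul_right_inj' hne]
    rw [key]
    interval_cases q <;> decide
  · rw [if_neg hc]
    have hnone : (([1,2,3,4,5,6,7,8,9] : List Int).find? (fun times => r == number * times)) = none := by
      rw [List.find?_eq_none]
      intro x hx
      simp only [beq_iff_eq]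
      intro heq
      have hm : r % number = 0 := by rw [heq]; exact Int.mul_emod_right number x
      have hd : r / number = x := by rw [heq]; exact Int.mul_ediv_cancel_left x hne
      apply hc
      refine ⟨hm, ?_, ?_⟩ <;> (rw [hd]; fin_cases hx <;> norm_num)
    rw [hnone]
    rfl
theorem main (number : Int) (h10 : 10 ≤ number)
    (hany : (((PySem.Int.toStr number).toList.drop 1).any (fun ch => ch != '0')) = true) :
    parasitic number = parasitic_alt number := by
  set s := (PySem.Int.toStr number).toList with hs
  set w := s.reverse.dropWhile (fun ch => ch == '0') with hwdef
  set k := (s.reverse.takeWhile (fun ch => ch == '0')).length with hkdef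
  have hsplit : s = w.reverse ++ List.replicate k '0' := by
    conv_lhs => rw [← List.reverse_reverse s, ← List.takeWhile_append_dropWhile
      (p := fun ch => ch == '0') (l := s.reverse)]
    rw [List.reverse_append]
    congr 1
    rw [hkdef, pv_takeWhile_zero, List.reverse_replicate, List.length_replicate]
  have ht2 : 2 ≤ w.length := by
    by_contra hlt
    simp only [not_le] at hlt
    rw [List.any_eq_true] at hany
    obtain ⟨x, hxmem, hxne⟩ := hany
    have hsmall : w.reverse = [] ∨ ∃ a, w.reverse = [a] := by
      rcases hrev : w.reverse with _ | ⟨a, _ | ⟨b, l⟩⟩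
      · exact Or.inl rfl
      · exact Or.inr ⟨a, rfl⟩
      · exfalso
        have := congrArg List.length hrev
        simp at this
        omega
    have hx0 : x = '0' := by
      rcases hsmall with hnil | ⟨a, ha⟩
      · rw [hsplit, hnil, List.nil_append, List.drop_replicate] at hxmem
        exact List.eq_of_mem_replicate hxmem
      · rw [hsplit, ha, List.singleton_append, List.drop_succ_cons, List.drop_zero] at hxmem
        exact List.eq_of_mem_replicate hxmem
    rw [hx0] at hxne
    simp at hxne
  have hwne : w ≠ [] := by
    intro h
    rw [h] at ht2
    simp at ht2
  set j : ℕ := w.length - 1 with hjdef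
  have hj1 : 1 ≤ j := by omega
  have hslen : s.length = w.length + k := by
    rw [hsplit]
    simp [List.length_append]
  have hc : ((w.head hwne) == '0') = false := List.head_dropWhile_not _ hwne
  have hjlt : j < w.reverse.length := by simp; omega
  have htj : w.reverse[j]'hjlt = w.head hwne := by
    rw [List.getElem_reverse]
    have : w.length - 1 - j = 0 := by omega
    simp only [this]
    exact List.getElem_zero (by omega)
  have hsj : s[j]? = some (w.head hwne) := by
    rw [hsplit, List.getElem?_append_left (by simp; omega), List.getElem?_eq_getElem hjlt, htj]
  have hT : ((PySem.List.pyGet? s ((j:ℕ):Int)).getD '0' != '0') = true := by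
    rw [PySem.List.pyGet?_natCast, hsj]
    simp only [Option.getD_some, bne, hc, Bool.not_false]
  have hFa : ∀ i : ℕ, j < i → ((PySem.List.pyGet? s ((i:ℕ):Int)).getD '0' != '0') = false := by
    intro i hi
    rw [PySem.List.pyGet?_natCast]
    by_cases hilen : i < s.length
    · have h0 : s[i]? = some '0' := by
        rw [hsplit, List.getElem?_append_right (by simp; omega), List.getElem?_replicate,
          if_pos (by simp only [List.length_reverse]; omega)]
      rw [h0]
      simp
    · rw [List.getElem?_eq_none (by omega)]
      simp
  have hfind := pv_find_desc (fun p => ((PySem.List.pyGet? s p).getD '0') != '0') j hj1 hT hFa k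
  have harg : ((s.length : Int) - 1) = ((j + k : ℕ) : Int) := by push_cast [hslen]; omega
  have hBidx : PySem.List.pyGet? w.reverse (-1) = some (w.head hwne) := by
    have hlen1 : -(w.reverse.length : Int) ≤ -1 := by simp; omega
    simp only [PySem.List.pyGet?, PySem.List.pyIdx?, if_neg (by norm_num : ¬ (0:Int) ≤ -1),
      if_pos hlen1, Option.bind_some]
    have : w.reverse.length - (-(-1:Int)).toNat = j := by simp; omega
    rw [this, List.getElem?_eq_getElem hjlt, htj]
  have hBlen : ((w.reverse.length : Int) - 1) = ((j:ℕ) : Int) := by simp; omega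
  simp only [parasitic, parasitic_alt, ← hs, ← hwdef, harg, hfind, hBidx, hBlen,
    PySem.List.pyGet?_natCast, hsj]
  cases hoc : PySem.Int.ofChars? ((w.head hwne) :: PySem.List.slice s none (some ((j:ℕ):Int))) with
  | none => rfl
  | some rotated =>
    simpa using pv_partII rotated number h10

-- ===== VERDICT (by name: the statement is the Claim_ definition above) =====
theorem parasitic_spec : Claim_equal_parasitic := by
  intro number _ hpre
  obtain ⟨h10, hany⟩ := hpre
  exact main number h10 hany

theorem parasitic_raises : Claim_raises_parasitic := by
  unfold Claim_raises_parasitic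
  refine ⟨?_, by decide, by decide, by decide⟩
  intro number _ hR hP
  obtain ⟨-, hall⟩ := hR
  obtain ⟨-, hany⟩ := hP
  rw [List.any_eq_true] at hany
  obtain ⟨x, hx, hxne⟩ := hany
  rw [List.all_eq_true] at hall
  have hx0 := hall x hx
  simp only [beq_iff_eq] at hx0
  simp [hx0] at hxne

-- witness self-check: B's port really returns the stated value at the raise witness
theorem parasitic_raises_witness :
    parasitic_alt pvRaiseWitness_parasitic = pvRaiseWitnessOut_parasitic :=
  parasitic_raises.2.2.2
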